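-- pv_equiv track=rewrite | github.com/Barbarpotato/Mathematics-for-Machine-Learning-Specialization | PCA/Week2-Assesment.py | most_similiar_images
-- ===== SOURCE A (Python) =====
-- def most_similiar_images(distances):
--     """Search the most similiar image at first image,
--     which need distances as a argument.distances is a list
--     that contains distances between each images."""
--     similiar = 0
--     index = 0
--     for idx, val in enumerate(distances[1:499]):
--         if idx == 0:
--             similiar = val
--         if val <= similiar:
--             similiar = val
--             index = idx + 1
--     return index
-- ===== SOURCE B (Python) =====
-- def most_similiar_images(distances):
--     sub = distances[1:499]
--     if not sub:
--         return 0
--     m = min(sub)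
--     # last occurrence of the minimum, found from the right, converted back
--     # to the original list's indexing (slice starts at 1)
--     return len(sub) - sub[::-1].index(m)
-- ===== Notes on version B (the rewrite author's own statement) =====
-- stated objective: alternative
-- what changed: Replaces the fused running-min-and-argmin loop (with its idx==0 seeding) by two passes: min() over the slice, then locating the minimum's last occurrence via a reversed-slice index(), converting back with len(sub) - revindex.
import Mathlib
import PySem

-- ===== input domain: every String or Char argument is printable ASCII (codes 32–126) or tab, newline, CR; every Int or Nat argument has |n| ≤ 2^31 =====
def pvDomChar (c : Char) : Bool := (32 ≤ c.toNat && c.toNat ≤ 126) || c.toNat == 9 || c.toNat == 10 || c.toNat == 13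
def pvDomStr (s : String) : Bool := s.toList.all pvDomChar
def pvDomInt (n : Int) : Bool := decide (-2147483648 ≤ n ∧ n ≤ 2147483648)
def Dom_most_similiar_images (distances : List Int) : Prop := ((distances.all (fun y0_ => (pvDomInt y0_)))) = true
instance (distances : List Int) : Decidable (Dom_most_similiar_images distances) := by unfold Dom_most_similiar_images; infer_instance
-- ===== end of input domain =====

-- B replaces A's fused running-min/argmin loop by two passes (min, then last occurrence via reversed index); alternative decomposition, same cost.


-- ===== PORT A =====
-- loop body of A: state (similiar, index), element (idx, val)
def pvStepA (st : Int × Int) (p : Int × Int) : Int × Int :=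
  let similiar := if p.1 = 0 then p.2 else st.1
  if p.2 ≤ similiar then (p.2, p.1 + 1) else (similiar, st.2)

def most_similiar_images (distances : List Int) : Int :=
  ((PySem.List.enumerate (PySem.List.slice distances (some 1) (some 499)) 0).foldl pvStepA (0, 0)).2

-- ===== PORT B =====
def most_similiar_images_alt (distances : List Int) : Int :=
  let sub := PySem.List.slice distances (some 1) (some 499)
  if sub = [] then 0
  else
    match PySem.List.min? sub (fun y => y) with
    | none => 0  -- unreachable: sub ≠ []
    | some m =>
      -- sub[::-1].index(m); m ∈ sub so the index exists
      match PySem.List.index? sub.reverse m with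
      | none => 0  -- unreachable
      | some i => (sub.length : Int) - (i : Int)

-- ===== PRECONDITION & SPEC =====
def Spec_most_similiar_images (distances : List Int) (out : Int) : Prop := out = most_similiar_images_alt distances
instance (distances : List Int) (out : Int) : Decidable (Spec_most_similiar_images distances out) := by unfold Spec_most_similiar_images; infer_instance

-- ===== CLAIM (what is proved, stated in full; the proofs are below) =====
def Claim_equal_most_similiar_images : Prop := ∀ (distances : List Int), Dom_most_similiar_images distances → Spec_most_similiar_images distances (most_similiar_images distances)

-- ===== LEMMAS AND PROOFS =====

-- characterisation of A's loop on a nonempty list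
theorem loopA_char : ∀ (l : List Int), l ≠ [] →
    (PySem.List.enumerate l 0).foldl pvStepA (0, 0) =
      ((PySem.List.min? l (fun y => y)).getD 0,
       (l.length : Int) - (((PySem.List.index? l.reverse ((PySem.List.min? l (fun y => y)).getD 0)).getD 0 : Nat) : Int)) := by
  intro l
  induction l using List.reverseRecOn with
  | nil => intro h; exact absurd rfl h
  | append_singleton l x ih =>
    intro _
    rcases eq_or_ne l [] with rfl | hl
    · simp [PySem.List.enumerate_cons, PySem.List.enumerate_nil, pvStepA,
        PySem.List.min?_id_cons]
    · obtain ⟨h0, t0, rfl⟩ := List.exists_cons_of_ne_nil hl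
      have hmin : PySem.List.min? (h0 :: t0) (fun y => y) = some (t0.foldl min h0) :=
        PySem.List.min?_id_cons ..
      set m := t0.foldl min h0 with hmdef
      have hm' : PySem.List.min? ((h0 :: t0) ++ [x]) (fun y => y) = some (min m x) := by
        rw [List.cons_append, PySem.List.min?_id_cons]
        simp [List.foldl_append, hmdef]
      have hmem : m ∈ h0 :: t0 := PySem.List.min?_mem hmin
      obtain ⟨i, hi⟩ : ∃ i, PySem.List.index? (h0 :: t0).reverse m = some i := by
        have := (PySem.List.index?_isSome_iff (h0 :: t0).reverse m).mpr
          (List.mem_reverse.mpr hmem)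
        exact Option.isSome_iff_exists.mp this
      have hrev : ((h0 :: t0) ++ [x]).reverse = x :: (h0 :: t0).reverse := by
        simp
      rw [PySem.List.enumerate_append, List.foldl_append, ih hl, hmin, hm', hrev]
      by_cases hx : x ≤ m
      · have hne : x ∉ ([] : List Int) := by simp
        rw [min_eq_right hx]
        simp only [PySem.List.enumerate_cons, PySem.List.enumerate_nil, List.foldl_cons,
          List.foldl_nil, pvStepA, hi, Option.getD_some]
        have hlen : (0 : Int) + ((h0 :: t0).length : Int) ≠ 0 := by
          simp; omega
        rw [if_neg hlen, if_pos hx, PySem.List.index?_cons_self]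
        simp
      · have hmlt : m < x := lt_of_not_ge hx
        rw [min_eq_left (le_of_lt hmlt)]
        simp only [PySem.List.enumerate_cons, PySem.List.enumerate_nil, List.foldl_cons,
          List.foldl_nil, pvStepA, hi, Option.getD_some]
        have hlen : (0 : Int) + ((h0 :: t0).length : Int) ≠ 0 := by
          simp; omega
        rw [if_neg hlen, if_neg hx, PySem.List.index?_cons_of_ne ((h0 :: t0).reverse) (ne_of_gt hmlt), hi]
        simp

theorem most_similiar_images_spec : Claim_equal_most_similiar_images := by
  intro distances _
  unfold Spec_most_similiar_images most_similiar_images most_similiar_images_alt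
  set sub := PySem.List.slice distances (some 1) (some 499) with hsub
  by_cases h : sub = []
  · simp [h]
  · rw [loopA_char sub h]
    rcases hm : PySem.List.min? sub (fun y => y) with _ | m
    · exact absurd (((PySem.List.min?_eq_none_iff _ _).mp hm)) h
    · have hmem : m ∈ sub := PySem.List.min?_mem hm
      rcases hi : PySem.List.index? sub.reverse m with _ | i
      · rw [PySem.List.index?_eq_none_iff] at hi
        exact absurd (List.mem_reverse.mpr hmem) hi
      · rw [PySem.List.index?_eq_idxOf?] at hi
        simp [h, hm, hi]
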